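-- pv_equiv track=rewrite | github.com/PaulvanT/Drop7 | Drop7.py | all_possible_combinations
-- ===== SOURCE A (Python) =====
-- def all_possible_combinations(nb_of_columns):
--     """
--        Deze functie returned een lijst van lijsten die alle mogelijke combinaties van kolommen bevat voor
--        een board met dimensie = nb_of_columns
--     """
--     # Maak een basislijst aan van 1 t.e.m. n ==> [1,...,n]
--     base_list = []
--     for i in range(1, nb_of_columns + 1):
--
--         base_list.append(i)
--
--     # Ver-n-voudig deze lijst, we krijgen n keer dezelfe basislijst
--     lists = [base_list] * (nb_of_columns)
--
--     all_combinations = [[]]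
--
--     # Dit volgende deel zal beginnen met een lege lijst (all_combinations) en er per stap meer getallen aan toevoegen
--     # van de lijsten 'list' in 'lists'. Per stap wordt er dus een getal aan de bestaande 'combinations' toegevoegd en worden
--     # het aantal 'combinations' n keer vermenigvuldigd (zo bekomen we  uiteindelijk de n^n gewenste 'combinations').
--
--     for list in lists:
--         all_combinations = [x + [y] for x in all_combinations for y in base_list]
--
--     return all_combinations
-- ===== SOURCE B (Python) =====
-- def all_possible_combinations(nb_of_columns):
--     # Decode each index k < n**n into n base-n digits (most-significant first),
--     # each digit d contributing d+1; enumerates combinations directly by index.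
--     n = max(nb_of_columns, 0)
--     total = n ** n  # 0 ** 0 == 1, so n == 0 yields [[]]
--     result = []
--     for k in range(total):
--         digits = []
--         for _ in range(n):
--             digits.append(k % n + 1)
--             k //= n
--         result.append(digits[::-1])
--     return result
-- ===== Notes on version B (the rewrite author's own statement) =====
-- stated objective: alternative
-- what changed: Instead of repeatedly expanding an accumulator list n times (A), B computes total = n**n and decodes each index k into n base-n digits (most-significant first, each digit d contributing d+1), emitting combinations directly in lexicographic order.
import Mathlib
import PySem

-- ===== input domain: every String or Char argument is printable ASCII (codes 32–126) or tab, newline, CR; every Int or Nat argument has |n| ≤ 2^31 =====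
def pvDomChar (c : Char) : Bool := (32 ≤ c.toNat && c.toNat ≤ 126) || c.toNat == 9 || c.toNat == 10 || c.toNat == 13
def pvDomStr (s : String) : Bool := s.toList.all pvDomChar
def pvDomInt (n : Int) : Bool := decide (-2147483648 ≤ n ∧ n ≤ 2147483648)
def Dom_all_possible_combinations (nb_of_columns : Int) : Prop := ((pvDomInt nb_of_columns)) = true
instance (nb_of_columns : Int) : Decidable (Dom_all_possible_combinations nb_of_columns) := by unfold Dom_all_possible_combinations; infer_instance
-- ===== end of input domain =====

-- B replaces A's repeated accumulator expansion by direct base-n decoding of each index k < n^n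
-- (most-significant digit first, digit d contributing d+1); alternative decomposition, same cost.

-- ===== PORT A =====
def all_possible_combinations (nb_of_columns : Int) : List (List Int) :=
  let base_list := (PySem.List.pyRange 1 (nb_of_columns + 1) 1).foldl (fun acc i => acc ++ [i]) []
  let lists := List.replicate nb_of_columns.toNat base_list
  lists.foldl (fun all_combinations _list =>
      all_combinations.flatMap (fun x => base_list.map (fun y => x ++ [y]))) [[]]

-- ===== PORT B =====
-- inner `for _ in range(n): digits.append(k % n + 1); k //= n` loop of Source B
def pvDigitsLoop (n : Int) (m : Nat) (k : Int) : List Int × Int :=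
  (List.range m).foldl
    (fun p _ => (p.1 ++ [PySem.Int.mod p.2 n + 1], PySem.Int.floordiv p.2 n)) ([], k)

def all_possible_combinations_alt (nb_of_columns : Int) : List (List Int) :=
  let n := max nb_of_columns 0
  let total := n ^ n.toNat
  (PySem.List.pyRange 0 total 1).foldl
    (fun result k => result ++ [(pvDigitsLoop n n.toNat k).1.reverse]) []

-- ===== PRECONDITION & SPEC =====
def Spec_all_possible_combinations (nb_of_columns : Int) (out : List (List Int)) : Prop := out = all_possible_combinations_alt nb_of_columns
instance (nb_of_columns : Int) (out : List (List Int)) : Decidable (Spec_all_possible_combinations nb_of_columns out) := by unfold Spec_all_possible_combinations; infer_instance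

-- ===== CLAIM (what is proved, stated in full; the proofs are below) =====
def Claim_equal_all_possible_combinations : Prop := ∀ (nb_of_columns : Int), Dom_all_possible_combinations nb_of_columns → Spec_all_possible_combinations nb_of_columns (all_possible_combinations nb_of_columns)

-- ===== LEMMAS AND PROOFS =====

-- base-m digits of k, least-significant first, each +1, length j
def pvDigitsLSB (b : Nat) : Nat → Nat → List Int
  | 0, _ => []
  | j+1, k => (((k % b : Nat) : Int) + 1) :: pvDigitsLSB b j (k / b)

theorem pv_foldl_const {α β : Type} (f : α → α) (init : α) (l : List β) :
    l.foldl (fun s _ => f s) init = f^[l.length] init := by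
  induction l generalizing init with
  | nil => rfl
  | cons x xs ih => simp [List.foldl_cons, ih, Function.iterate_succ_apply]

theorem pv_range_mul (a b : Nat) :
    List.range (a * b) = (List.range a).flatMap (fun q => (List.range b).map (fun r => q * b + r)) := by
  induction a with
  | zero => simp
  | succ a ih =>
      rw [Nat.succ_mul, List.range_add, ih, List.range_succ, List.flatMap_append]
      simp [List.flatMap_cons, Nat.add_comm]

theorem pv_digits_decomp (b j q r : Nat) (hr : r < b) :
    pvDigitsLSB b (j+1) (q * b + r) = (((r : Nat) : Int) + 1) :: pvDigitsLSB b j q := by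
  have hb : 0 < b := Nat.pos_of_ne_zero (by omega)
  have h1 : (q * b + r) % b = r := by
    rw [Nat.mul_comm, Nat.mul_add_mod]; exact Nat.mod_eq_of_lt hr
  have h2 : (q * b + r) / b = q := by
    rw [Nat.mul_comm, Nat.mul_add_div hb, Nat.div_eq_of_lt hr, Nat.add_zero]
  simp [pvDigitsLSB, h1, h2]

-- A's accumulator after j expansion steps over base [1..m] = all length-j digit strings, by index
theorem pv_iterA (m : Nat) (j : Nat) :
    (fun S : List (List Int) =>
        S.flatMap (fun x => ((List.range m).map (fun i => (1 : Int) + (i : Nat))).map (fun y => x ++ [y])))^[j] [[]]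
      = (List.range (m ^ j)).map (fun k => (pvDigitsLSB m j k).reverse) := by
  induction j with
  | zero => simp [pvDigitsLSB]
  | succ j ih =>
      rw [Function.iterate_succ_apply', ih, pow_succ, pv_range_mul]
      rw [List.flatMap_map, List.map_flatMap]
      apply List.flatMap_congr
      intro q _
      rw [List.map_map, List.map_map]
      apply List.map_eq_map_iff.mpr
      intro r hr
      rw [List.mem_range] at hr
      simp only [Function.comp_apply, pv_digits_decomp m j q r hr, List.reverse_cons]
      rw [Int.add_comm]

-- B's inner loop computes the LSB-first digit list
theorem pv_digitsLoop_eq (m : Nat) (j : Nat) (k : Nat) (acc : List Int) :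
    (List.range j).foldl
      (fun p _ => (p.1 ++ [PySem.Int.mod p.2 (m : Int) + 1], PySem.Int.floordiv p.2 (m : Int))) (acc, (k : Int))
      = (acc ++ pvDigitsLSB m j k, ((k / m ^ j : Nat) : Int)) := by
  induction j generalizing k acc with
  | zero => simp [pvDigitsLSB]
  | succ j ih =>
      rw [List.range_succ_eq_map]
      simp only [List.foldl_cons, List.foldl_map]
      rw [PySem.Int.mod_natCast, PySem.Int.floordiv_natCast]
      have := ih (k / m) (acc ++ [((k % m : Nat) : Int) + 1])
      rw [this]
      have hdiv : k / m / m ^ j = k / m ^ (j + 1) := by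
        rw [Nat.div_div_eq_div_mul, pow_succ, Nat.mul_comm]
      simp [pvDigitsLSB, hdiv]

theorem pv_main (n : Int) : all_possible_combinations n = all_possible_combinations_alt n := by
  by_cases hn : n ≤ 0
  · have h0 : n.toNat = 0 := Int.toNat_of_nonpos hn
    have hm : max n 0 = 0 := max_eq_right hn
    simp [all_possible_combinations, all_possible_combinations_alt, hm, h0, pvDigitsLoop]
  · rw [not_le] at hn
    lift n to Nat using hn.le with m
    have hmpos : 0 < m := by exact_mod_cast hn
    have htn : (m : Int).toNat = m := Int.toNat_natCast m
    -- A's side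
    have hbase : (PySem.List.pyRange 1 ((m : Int) + 1) 1).foldl (fun acc i => acc ++ [i]) []
        = (List.range m).map (fun i => (1 : Int) + (i : Nat)) := by
      have h : ((m : Int) + 1 - 1).toNat = m := by omega
      rw [PySem.List.foldl_append_singleton, List.nil_append, PySem.List.pyRange_one, h]
    have hA : all_possible_combinations (m : Int)
        = (List.range (m ^ m)).map (fun k => (pvDigitsLSB m m k).reverse) := by
      rw [all_possible_combinations]
      simp only [hbase, htn]
      rw [pv_foldl_const, List.length_replicate]
      exact pv_iterA m m
    -- B's side
    have hmax : max (m : Int) 0 = (m : Int) := max_eq_left (by exact_mod_cast hmpos.le)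
    rw [hA, all_possible_combinations_alt]
    simp only [hmax, htn]
    have htot : (m : Int) ^ m = ((m ^ m : Nat) : Int) := by push_cast; rfl
    rw [htot, PySem.List.pyRange_zero_natCast,
      PySem.List.foldl_append_singleton_eq_map, List.map_map]
    apply List.map_eq_map_iff.mpr
    intro k _
    simp only [Function.comp_apply, pvDigitsLoop]
    rw [pv_digitsLoop_eq m m k []]
    simp

-- ===== VERDICT (by name: the statement is the Claim_ definition above) =====
theorem all_possible_combinations_spec : Claim_equal_all_possible_combinations := by
  intro n _
  exact pv_main n
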